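-- pv_equiv track=rewrite | github.com/vo-andrew/interview-prep | epi/5.1.py | solution
-- ===== SOURCE A (Python) =====
-- def solution(A, i):
--     """
--     The main intuition behind this brute force approach is that we create a new output array that we populate with the elements from our input array in their partitioned order with 3 passes.
--     """
--     if not A:
--         return A
--     elif i >= len(A):
--         return A
--     pivot = A[i]
--     output = list()
--     for elem in A:
--         if elem < pivot:
--             output.append(elem)
--     for elem in A:
--         if elem == pivot:
--             output.append(elem)
--     for elem in A:
--         if elem > pivot:
--             output.append(elem)
--     return output
-- ===== SOURCE B (Python) =====
-- def solution(A, i):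
--     if not A:
--         return A
--     elif i >= len(A):
--         return A
--     pivot = A[i]
--     less, equal, greater = [], [], []
--     for elem in A:
--         if elem < pivot:
--             less.append(elem)
--         elif elem == pivot:
--             equal.append(elem)
--         else:
--             greater.append(elem)
--     return less + equal + greater
-- ===== Notes on version B (the rewrite author's own statement) =====
-- stated objective: simpler
-- what changed: Replaces A's three full scans of the input with a single pass that dispatches each element into one of three buckets (less/equal/greater) and concatenates them.
import Mathlib
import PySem

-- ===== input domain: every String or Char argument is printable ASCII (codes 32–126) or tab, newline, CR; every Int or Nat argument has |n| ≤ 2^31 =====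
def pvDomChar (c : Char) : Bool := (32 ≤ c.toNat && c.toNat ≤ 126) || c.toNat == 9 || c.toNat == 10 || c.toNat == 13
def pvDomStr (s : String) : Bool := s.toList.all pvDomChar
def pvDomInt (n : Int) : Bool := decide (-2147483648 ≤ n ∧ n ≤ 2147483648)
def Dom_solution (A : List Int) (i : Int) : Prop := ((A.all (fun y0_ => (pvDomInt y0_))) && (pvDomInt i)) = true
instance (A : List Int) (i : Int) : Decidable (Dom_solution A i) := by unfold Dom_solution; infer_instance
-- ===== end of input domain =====

-- B replaces A's three full scans by a single pass into three buckets (less/equal/greater); simpler, same result.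

-- ===== PORT A =====
def solution (A : List Int) (i : Int) : List Int :=
  if A = [] then A
  else if (A.length : Int) ≤ i then A
  else
    match PySem.List.pyGet? A i with
    | none => []   -- IndexError in Python; excluded by Pre_solution
    | some pivot =>
      let out := A.foldl (fun acc elem => if elem < pivot then acc ++ [elem] else acc) []
      let out := A.foldl (fun acc elem => if elem = pivot then acc ++ [elem] else acc) out
      A.foldl (fun acc elem => if pivot < elem then acc ++ [elem] else acc) out

-- ===== PORT B =====
def solution_alt (A : List Int) (i : Int) : List Int :=
  if A = [] then A
  else if (A.length : Int) ≤ i then A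
  else
    match PySem.List.pyGet? A i with
    | none => []   -- IndexError in Python; excluded by Pre_solution
    | some pivot =>
      let buckets := A.foldl
        (fun (acc : List Int × List Int × List Int) elem =>
          if elem < pivot then (acc.1 ++ [elem], acc.2.1, acc.2.2)
          else if elem = pivot then (acc.1, acc.2.1 ++ [elem], acc.2.2)
          else (acc.1, acc.2.1, acc.2.2 ++ [elem]))
        ([], [], [])
      buckets.1 ++ buckets.2.1 ++ buckets.2.2

-- ===== PRECONDITION & SPEC =====
-- Pre_ excludes exactly the inputs where Python's A[i] raises IndexError (nonempty A with i < -len(A) and i < len(A)).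
def Pre_solution (A : List Int) (i : Int) : Prop :=
  A = [] ∨ (A.length : Int) ≤ i ∨ -(A.length : Int) ≤ i
instance (A : List Int) (i : Int) : Decidable (Pre_solution A i) := by unfold Pre_solution; infer_instance
def pvWitness_solution : List Int × Int := ([3, 1, 2, 2, 5], 2)

def Spec_solution (A : List Int) (i : Int) (out : List Int) : Prop := out = solution_alt A i
instance (A : List Int) (i : Int) (out : List Int) : Decidable (Spec_solution A i out) := by unfold Spec_solution; infer_instance

-- ===== CLAIM (what is proved, stated in full; the proofs are below) =====
def Claim_equal_solution : Prop := ∀ (A : List Int) (i : Int), Dom_solution A i → Pre_solution A i → Spec_solution A i (solution A i)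

-- ===== LEMMAS AND PROOFS =====

lemma tri_fold (p : Int) (A l e g : List Int) :
    A.foldl
      (fun (acc : List Int × List Int × List Int) elem =>
        if elem < p then (acc.1 ++ [elem], acc.2.1, acc.2.2)
        else if elem = p then (acc.1, acc.2.1 ++ [elem], acc.2.2)
        else (acc.1, acc.2.1, acc.2.2 ++ [elem]))
      (l, e, g)
    = (l ++ A.filter (fun x => decide (x < p)),
       e ++ A.filter (fun x => decide (x = p)),
       g ++ A.filter (fun x => decide (p < x))) := by
  induction A generalizing l e g with
  | nil => simp
  | cons x xs ih =>
    by_cases h1 : x < p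
    · simp [List.foldl_cons, h1, ih, List.filter_cons, List.append_assoc]
      all_goals omega
    · by_cases h2 : x = p
      · simp [List.foldl_cons, h1, h2, ih, List.filter_cons, List.append_assoc]
        all_goals omega
      · simp [List.foldl_cons, h1, h2, ih, List.filter_cons, List.append_assoc]
        all_goals omega
      all_goals omega

lemma filt_fold (q : Int → Prop) [DecidablePred q] (A acc : List Int) :
    A.foldl (fun acc elem => if q elem then acc ++ [elem] else acc) acc
    = acc ++ A.filter (fun x => decide (q x)) := by
  induction A generalizing acc with
  | nil => simp
  | cons x xs ih =>
    by_cases h : q x <;> simp [List.foldl_cons, h, ih, List.append_assoc]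

-- ===== VERDICT (by name: the statement is the Claim_ definition above) =====
theorem solution_spec : Claim_equal_solution := by
  intro A i _ _
  unfold Spec_solution solution solution_alt
  split
  · rfl
  · split
    · rfl
    · cases hp : PySem.List.pyGet? A i with
      | none => rfl
      | some pivot =>
        simp only [tri_fold, filt_fold (fun x => x < pivot),
          filt_fold (fun x => x = pivot), filt_fold (fun x => pivot < x),
          List.nil_append]
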